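-- pv_equiv track=rewrite | github.com/parvini82/db_agent | core/workflow.py | _clean_sql_response
-- ===== SOURCE A (Python) =====
-- def _clean_sql_response(response: str) -> str:
--     """Clean SQL response from LLM"""
--     # Remove markdown formatting
--     if response.startswith("```sql"):
--         response = response.replace("```sql", "").replace("```", "").strip()
--     elif response.startswith("```"):
--         response = response.replace("```", "").strip()
--
--     # Remove any extra text before/after SQL
--     lines = response.split('\n')
--     sql_lines = []
--     in_sql = False
--
--     for line in lines:
--         line = line.strip()
--         if line.upper().startswith(('SELECT', 'WITH', 'INSERT', 'UPDATE', 'DELETE')):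
--             in_sql = True
--         if in_sql:
--             sql_lines.append(line)
--
--     return '\n'.join(sql_lines).strip()
-- ===== SOURCE B (Python) =====
-- def _clean_sql_response(response: str) -> str:
--     """Clean SQL response from LLM"""
--     # Remove markdown formatting (same guard as A)
--     if response.startswith("```sql"):
--         response = response.replace("```sql", "").replace("```", "").strip()
--     elif response.startswith("```"):
--         response = response.replace("```", "").strip()
--
--     # Strip every line once, then find the first SQL keyword line and keep the tail
--     stripped = [line.strip() for line in response.split('\n')]
--     idx = next((i for i, line in enumerate(stripped)
--                 if line.upper().startswith(('SELECT', 'WITH', 'INSERT', 'UPDATE', 'DELETE'))),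
--                None)
--     if idx is None:
--         return ''
--     return '\n'.join(stripped[idx:]).strip()
-- ===== Notes on version B (the rewrite author's own statement) =====
-- stated objective: alternative
-- what changed: A's latching single-pass boolean accumulator is replaced by strip-all-lines, find the index of the first keyword line, then join the tail slice (with an explicit empty-result case when no keyword line exists).
import Mathlib
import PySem

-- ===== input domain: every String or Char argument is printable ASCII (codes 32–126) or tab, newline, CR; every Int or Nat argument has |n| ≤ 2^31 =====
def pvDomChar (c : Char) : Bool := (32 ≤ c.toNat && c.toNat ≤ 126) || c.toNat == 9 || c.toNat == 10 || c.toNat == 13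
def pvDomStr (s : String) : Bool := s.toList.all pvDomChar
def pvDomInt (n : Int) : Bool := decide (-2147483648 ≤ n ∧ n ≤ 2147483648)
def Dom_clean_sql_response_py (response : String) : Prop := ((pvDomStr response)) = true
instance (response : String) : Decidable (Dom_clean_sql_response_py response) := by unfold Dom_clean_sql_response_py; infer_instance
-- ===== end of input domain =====

-- B replaces A's latching boolean accumulator by strip-all-lines, find-first-keyword-index, join-the-tail (alternative decomposition).


-- shared by both ports: the markdown-fence guard (identical in A and B) and the keyword test
def stripFences (response : String) : String :=
  if PySem.Str.startswith response "```sql" then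
    PySem.Str.strip (PySem.Str.replace (PySem.Str.replace response "```sql" "") "```" "")
  else if PySem.Str.startswith response "```" then
    PySem.Str.strip (PySem.Str.replace response "```" "")
  else response

-- line.upper().startswith(('SELECT','WITH','INSERT','UPDATE','DELETE'))
def kwHit (line : String) : Bool :=
  ["SELECT", "WITH", "INSERT", "UPDATE", "DELETE"].any
    (fun k => PySem.Str.startswith (PySem.Str.upper line) k)

-- ===== PORT A =====
-- A's loop body: strip the line, latch in_sql, append while latched
def stepA (st : List String × Bool) (line : String) : List String × Bool :=
  let line := PySem.Str.strip line
  let in_sql := st.2 || kwHit line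
  (if in_sql then st.1 ++ [line] else st.1, in_sql)

def clean_sql_response_py (response : String) : String :=
  let response := stripFences response
  let lines := (PySem.Str.split? response "\n").getD []
  let st := lines.foldl stepA ([], false)
  PySem.Str.strip (PySem.Str.join "\n" st.1)

-- ===== PORT B =====
def clean_sql_response_py_alt (response : String) : String :=
  let response := stripFences response
  let stripped := ((PySem.Str.split? response "\n").getD []).map PySem.Str.strip
  match stripped.findIdx? kwHit with
  | none => ""
  | some i => PySem.Str.strip (PySem.Str.join "\n" (stripped.drop i))

-- ===== PRECONDITION & SPEC =====
def Spec_clean_sql_response_py (response : String) (out : String) : Prop := out = clean_sql_response_py_alt response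
instance (response : String) (out : String) : Decidable (Spec_clean_sql_response_py response out) := by unfold Spec_clean_sql_response_py; infer_instance

-- ===== CLAIM (what is proved, stated in full; the proofs are below) =====
def Claim_equal_clean_sql_response_py : Prop := ∀ (response : String), Dom_clean_sql_response_py response → Spec_clean_sql_response_py response (clean_sql_response_py response)

-- ===== LEMMAS AND PROOFS =====

-- once latched, A appends every remaining stripped line
theorem foldA_true (ls : List String) (acc : List String) :
    ls.foldl stepA (acc, true) = (acc ++ ls.map PySem.Str.strip, true) := by
  induction ls generalizing acc with
  | nil => simp
  | cons l rest ih => simp [stepA, ih]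

-- A's accumulator from the unlatched start = B's find-then-tail
theorem foldA_false (ls : List String) :
    (ls.foldl stepA ([], false)).1 =
      match (ls.map PySem.Str.strip).findIdx? kwHit with
      | none => []
      | some i => (ls.map PySem.Str.strip).drop i := by
  induction ls with
  | nil => simp
  | cons l rest ih =>
    by_cases h : kwHit (PySem.Str.strip l)
    · simp [stepA, h, foldA_true, List.findIdx?_cons]
    · have hstep : stepA ([], false) l = ([], false) := by simp [stepA, h]
      rw [List.foldl_cons, hstep, ih, List.map_cons, List.findIdx?_cons]
      simp only [h]
      cases (rest.map PySem.Str.strip).findIdx? kwHit <;> simp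

-- ===== VERDICT (by name: the statement is the Claim_ definition above) =====
theorem clean_sql_response_py_spec : Claim_equal_clean_sql_response_py := by
  intro response _
  unfold Spec_clean_sql_response_py clean_sql_response_py clean_sql_response_py_alt
  dsimp only
  rw [foldA_false]
  cases hf : (((PySem.Str.split? (stripFences response) "\n").getD []).map PySem.Str.strip).findIdx? kwHit <;>
    simp [PySem.Str.join, PySem.Chars.join, PySem.Str.strip, PySem.Chars.strip, PySem.Chars.rstrip, PySem.Chars.lstrip, List.intercalate]
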